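-- pv_equiv track=rewrite | github.com/khive-ai/khive.d | tests/services/orchestration/test_orchestration_security.py | _contains_path_traversal
-- ===== SOURCE A (Python) =====
-- def _contains_path_traversal(path_str):
--     """Check if path string contains traversal sequences."""
--     dangerous_patterns = [
--         "../",
--         "..\\",
--         "/etc",
--         "/root",
--         "/home",
--         "C:\\Windows",
--         "System32",
--     ]
--     return any(pattern in path_str for pattern in dangerous_patterns)
-- ===== SOURCE B (Python) =====
-- def _contains_path_traversal(path_str):
--     """Check if path string contains traversal sequences."""
--     dangerous_patterns = (
--         "../",
--         "..\\",
--         "/etc",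
--         "/root",
--         "/home",
--         "C:\\Windows",
--         "System32",
--     )
--     return any(path_str.startswith(dangerous_patterns, i) for i in range(len(path_str)))
-- ===== Notes on version B (the rewrite author's own statement) =====
-- stated objective: alternative
-- what changed: B makes a single left-to-right pass over the string positions, testing all seven dangerous literals at once via tuple startswith at each offset, instead of A scanning the whole string separately for each pattern with the containment operator.
import Mathlib
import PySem

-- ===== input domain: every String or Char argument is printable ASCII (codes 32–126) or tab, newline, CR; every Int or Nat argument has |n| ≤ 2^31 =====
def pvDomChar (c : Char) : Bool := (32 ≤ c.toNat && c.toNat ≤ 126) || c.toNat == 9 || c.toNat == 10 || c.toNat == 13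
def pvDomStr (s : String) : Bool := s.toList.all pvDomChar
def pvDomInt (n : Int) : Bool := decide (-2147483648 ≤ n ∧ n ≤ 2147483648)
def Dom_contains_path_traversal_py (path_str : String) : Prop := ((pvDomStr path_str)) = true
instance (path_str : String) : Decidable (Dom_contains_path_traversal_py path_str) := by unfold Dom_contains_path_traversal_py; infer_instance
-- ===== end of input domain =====

-- B replaces A's seven separate 'in' substring scans with one pass over the string's
-- positions testing all seven literals at each offset (tuple startswith); alternative, not faster.


-- ===== PORT A =====
def contains_path_traversal_py (path_str : String) : Bool :=
  -- any(pattern in path_str for pattern in dangerous_patterns)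
  ["../", "..\\", "/etc", "/root", "/home", "C:\\Windows", "System32"].any
    (fun pattern => PySem.Str.isIn pattern path_str)

-- ===== PORT B =====
-- the tuple of dangerous literals, as in Source B
def pvDangerousPats : List (List Char) :=
  ["../".toList, "..\\".toList, "/etc".toList, "/root".toList, "/home".toList,
   "C:\\Windows".toList, "System32".toList]

def contains_path_traversal_py_alt (path_str : String) : Bool :=
  -- any(path_str.startswith(dangerous_patterns, i) for i in range(len(path_str)))
  (List.range path_str.toList.length).any
    (fun i => pvDangerousPats.any (fun p => p.isPrefixOf (path_str.toList.drop i)))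

-- ===== PRECONDITION & SPEC =====
def Spec_contains_path_traversal_py (path_str : String) (out : Bool) : Prop := out = contains_path_traversal_py_alt path_str
instance (path_str : String) (out : Bool) : Decidable (Spec_contains_path_traversal_py path_str out) := by unfold Spec_contains_path_traversal_py; infer_instance

-- ===== CLAIM (what is proved, stated in full; the proofs are below) =====
def Claim_equal_contains_path_traversal_py : Prop := ∀ (path_str : String), Dom_contains_path_traversal_py path_str → Spec_contains_path_traversal_py path_str (contains_path_traversal_py path_str)

-- ===== LEMMAS AND PROOFS =====

-- substring containment = some in-range offset where the pattern is a prefix (for nonempty patterns)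
theorem pv_isIn_eq_any_range (p l : List Char) (hp : p ≠ []) :
    PySem.Chars.isIn p l = (List.range l.length).any (fun i => p.isPrefixOf (l.drop i)) := by
  rcases h : PySem.Chars.isIn p l with _ | _
  · symm
    rw [List.any_eq_false]
    intro i _
    simp only [List.isPrefixOf_iff_prefix]
    intro hpre
    have : PySem.Chars.isIn p l = true :=
      (PySem.Chars.exists_prefix_drop_iff_isIn p l).mp ⟨i, hpre⟩
    simp [h] at this
  · symm
    rw [List.any_eq_true]
    obtain ⟨j, hj⟩ := (PySem.Chars.exists_prefix_drop_iff_isIn p l).mpr h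
    have hlt : j < l.length := by
      by_contra hge
      have : l.drop j = [] := List.drop_eq_nil_of_le (by omega)
      rw [this, List.prefix_nil] at hj
      exact hp hj
    exact ⟨j, List.mem_range.mpr hlt, by simpa [List.isPrefixOf_iff_prefix] using hj⟩

-- ===== VERDICT (by name: the statement is the Claim_ definition above) =====
theorem contains_path_traversal_py_spec : Claim_equal_contains_path_traversal_py := by
  intro s _
  unfold Spec_contains_path_traversal_py contains_path_traversal_py contains_path_traversal_py_alt
  simp only [List.any_cons, List.any_nil, PySem.Str.isIn_eq, pvDangerousPats]
  rw [pv_isIn_eq_any_range _ _ (by decide), pv_isIn_eq_any_range _ _ (by decide),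
      pv_isIn_eq_any_range _ _ (by decide), pv_isIn_eq_any_range _ _ (by decide),
      pv_isIn_eq_any_range _ _ (by decide), pv_isIn_eq_any_range _ _ (by decide),
      pv_isIn_eq_any_range _ _ (by decide)]
  induction List.range s.toList.length with
  | nil => simp
  | cons i is ih =>
    simp only [List.any_cons, ← ih]
    cases h1 : ("../".toList.isPrefixOf (s.toList.drop i)) <;>
    cases h2 : ("..\\".toList.isPrefixOf (s.toList.drop i)) <;>
    cases h3 : ("/etc".toList.isPrefixOf (s.toList.drop i)) <;>
    cases h4 : ("/root".toList.isPrefixOf (s.toList.drop i)) <;>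
    cases h5 : ("/home".toList.isPrefixOf (s.toList.drop i)) <;>
    cases h6 : ("C:\\Windows".toList.isPrefixOf (s.toList.drop i)) <;>
    cases h7 : ("System32".toList.isPrefixOf (s.toList.drop i)) <;>
      simp_all
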